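-- pv_equiv track=rewrite | github.com/Pororo-Study/Programmers-High-Kit | PCCP-모의고사/2회/[PCCP 모의고사 2] 2번_현지연.py | solution
-- ===== SOURCE A (Python) =====
-- import heapq    # 최소 힙  # 우선순위 큐
--
-- def solution(ability, number):
--     heapq.heapify(ability)  # 기존 리스트를 힙으로 변환
--
--     for _ in range(number):
--         a = heapq.heappop(ability)  # 최솟값 추출
--         b = heapq.heappop(ability)  # 두번째 최솟값 추출
--         heapq.heappush(ability, a + b)  # 능력치의 합 삽입
--         heapq.heappush(ability, a + b)  # 능력치의 합 삽입
--
--     return sum(ability) # 모든 신입사원들의 능력치의 합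
-- ===== SOURCE B (Python) =====
-- def _insert(xs, v):
--     # insert v into the sorted list xs, keeping it sorted (before first element >= v's place)
--     for i, x in enumerate(xs):
--         if v <= x:
--             return xs[:i] + [v] + xs[i:]
--     return xs + [v]
--
-- def solution(ability, number):
--     xs = sorted(ability)
--     for _ in range(number):
--         s = xs[0] + xs[1]
--         xs = _insert(_insert(xs[2:], s), s)
--     return sum(xs)
-- ===== Notes on version B (the rewrite author's own statement) =====
-- stated objective: alternative
-- what changed: Replaces the binary heap with a plain sorted list: the two smallest are the first two elements and each merged sum is re-inserted by an ordered linear insertion; no heapify/sift operations and the input list is not mutated.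
import Mathlib
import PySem

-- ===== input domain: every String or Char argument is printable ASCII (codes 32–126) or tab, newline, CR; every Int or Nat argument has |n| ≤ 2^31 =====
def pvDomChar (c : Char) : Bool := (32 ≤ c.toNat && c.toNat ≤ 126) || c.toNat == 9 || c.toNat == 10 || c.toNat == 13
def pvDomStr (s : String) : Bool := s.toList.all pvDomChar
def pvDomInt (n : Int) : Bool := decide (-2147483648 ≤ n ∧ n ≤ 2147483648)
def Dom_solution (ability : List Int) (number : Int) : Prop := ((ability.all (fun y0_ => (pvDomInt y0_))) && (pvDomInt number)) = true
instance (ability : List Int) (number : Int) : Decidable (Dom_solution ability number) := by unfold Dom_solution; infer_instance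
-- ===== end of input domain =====

-- B replaces A's binary heap by a sorted list with ordered linear insertion (no heap, input not
-- mutated); A heapifies `ability` in place, so the equivalence is about the return value only.

-- ===== PORT A =====
-- heapq.heappop is ported by its contract: extract the minimum value (PySem.List.min?) and remove
-- one occurrence of it; heapq.heappush adds the element (appended; only the multiset matters to
-- later pops/sum). The `none` branches are Python's IndexError, excluded by Pre_solution.
def solution (ability : List Int) (number : Int) : Int :=
  ((PySem.List.pyRange 0 number 1).foldl (fun h _ =>
    match PySem.List.min? h (fun x => x) with
    | none => h
    | some a =>
      let h1 := h.erase a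
      match PySem.List.min? h1 (fun x => x) with
      | none => h1
      | some b => (h1.erase b) ++ [a + b, a + b]) ability).sum

-- ===== PORT B =====
-- literal port of Source B's _insert: walk the sorted list, put v before the first element ≥ v
def insSorted (xs : List Int) (v : Int) : List Int :=
  match xs with
  | [] => [v]
  | x :: rest => if v ≤ x then v :: x :: rest else x :: insSorted rest v

def solution_alt (ability : List Int) (number : Int) : Int :=
  ((PySem.List.pyRange 0 number 1).foldl (fun xs _ =>
    match xs with
    | a :: b :: rest => insSorted (insSorted rest (a + b)) (a + b)
    | _ => xs) (PySem.List.sorted ability (fun x => x) false)).sum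

-- ===== PRECONDITION & SPEC =====
-- With number > 0 and fewer than two elements, A's heappop raises IndexError (and B's xs[1] does too).
def Pre_solution (ability : List Int) (number : Int) : Prop := number ≤ 0 ∨ 2 ≤ ability.length
instance (ability : List Int) (number : Int) : Decidable (Pre_solution ability number) := by
  unfold Pre_solution; infer_instance
def pvWitness_solution : List Int × Int := ([3, 1, 2], 2)

def Spec_solution (ability : List Int) (number : Int) (out : Int) : Prop := out = solution_alt ability number
instance (ability : List Int) (number : Int) (out : Int) : Decidable (Spec_solution ability number out) := by unfold Spec_solution; infer_instance

-- ===== CLAIM (what is proved, stated in full; the proofs are below) =====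
def Claim_equal_solution : Prop := ∀ (ability : List Int) (number : Int), Dom_solution ability number → Pre_solution ability number → Spec_solution ability number (solution ability number)

-- ===== LEMMAS AND PROOFS =====

theorem perm_insSorted (xs : List Int) (v : Int) : List.Perm (insSorted xs v) (v :: xs) := by
  induction xs with
  | nil => simp [insSorted]
  | cons x rest ih =>
    simp only [insSorted]
    split
    · exact List.Perm.refl _
    · exact (ih.cons x).trans (List.Perm.swap v x rest)

theorem mem_insSorted {xs : List Int} {v y : Int} (h : y ∈ insSorted xs v) : y = v ∨ y ∈ xs := by
  have := (perm_insSorted xs v).mem_iff.mp h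
  simpa using this

theorem sorted_insSorted {xs : List Int} (v : Int) (h : xs.Pairwise (· ≤ ·)) :
    (insSorted xs v).Pairwise (· ≤ ·) := by
  induction xs with
  | nil => simp [insSorted]
  | cons x rest ih =>
    rw [List.pairwise_cons] at h
    simp only [insSorted]
    split
    · rename_i hv
      refine List.pairwise_cons.mpr ⟨?_, List.pairwise_cons.mpr h⟩
      intro y hy
      rcases List.mem_cons.mp hy with rfl | h1
      · exact hv
      · exact le_trans hv (h.1 y h1)
    · rename_i hv
      refine List.pairwise_cons.mpr ⟨?_, ih h.2⟩
      intro y hy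
      rcases mem_insSorted hy with rfl | h1
      · omega
      · exact h.1 y h1

theorem min?_of_sorted_perm {h xs : List Int} {a : Int} {t : List Int}
    (hp : List.Perm h xs) (hs : xs.Pairwise (· ≤ ·)) (hx : xs = a :: t) :
    PySem.List.min? h (fun x => x) = some a := by
  subst hx
  have hne : h ≠ [] := by
    intro h0; subst h0; exact absurd hp.symm.length_eq (by simp)
  obtain ⟨m, hm⟩ : ∃ m, PySem.List.min? h (fun x => x) = some m := by
    cases hminq : PySem.List.min? h (fun x => x) with
    | none => exact absurd ((PySem.List.min?_eq_none_iff h (fun x => x)).mp hminq) hne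
    | some m => exact ⟨m, rfl⟩
  have hmem : m ∈ h := PySem.List.min?_mem hm
  have hmin : ∀ y ∈ h, m ≤ y := by
    intro y hy; exact PySem.List.min?_isMin hm y hy
  have hma : m ≤ a := hmin a (hp.mem_iff.mpr (by simp))
  have ham : a ≤ m := by
    have hmx : m ∈ a :: t := hp.mem_iff.mp hmem
    rcases List.mem_cons.mp hmx with rfl | hmt
    · exact le_rfl
    · exact (List.pairwise_cons.mp hs).1 m hmt
  rw [hm, le_antisymm hma ham]

theorem fold_lemma (r : List Int) :
    ∀ (h xs : List Int), List.Perm h xs → xs.Pairwise (· ≤ ·) → 2 ≤ xs.length →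
    List.Perm
    (r.foldl (fun h _ =>
      match PySem.List.min? h (fun x => x) with
      | none => h
      | some a =>
        let h1 := h.erase a
        match PySem.List.min? h1 (fun x => x) with
        | none => h1
        | some b => (h1.erase b) ++ [a + b, a + b]) h)
    (r.foldl (fun xs _ =>
      match xs with
      | a :: b :: rest => insSorted (insSorted rest (a + b)) (a + b)
      | _ => xs) xs) := by
  induction r with
  | nil => intro h xs hp _ _; simpa using hp
  | cons i r ih =>
    intro h xs hp hs hl
    obtain ⟨a, b, rest, rfl⟩ : ∃ a b rest, xs = a :: b :: rest := by
      match xs, hl with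
      | a :: b :: rest, _ => exact ⟨a, b, rest, rfl⟩
    simp only [List.foldl_cons]
    have hmin1 : PySem.List.min? h (fun x => x) = some a :=
      min?_of_sorted_perm hp hs rfl
    have hp1 : List.Perm (h.erase a) (b :: rest) := by
      have := hp.erase a
      rwa [List.erase_cons_head] at this
    have hs1 : (b :: rest).Pairwise (· ≤ ·) := (List.pairwise_cons.mp hs).2
    have hmin2 : PySem.List.min? (h.erase a) (fun x => x) = some b :=
      min?_of_sorted_perm hp1 hs1 rfl
    have hp2 : List.Perm ((h.erase a).erase b) rest := by
      have := hp1.erase b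
      rwa [List.erase_cons_head] at this
    have hpstep : List.Perm (((h.erase a).erase b) ++ [a + b, a + b])
        (insSorted (insSorted rest (a + b)) (a + b)) := by
      refine ((hp2.append_right [a + b, a + b]).trans ?_)
      have h1 : List.Perm (rest ++ [a + b, a + b]) ((a + b) :: (a + b) :: rest) :=
        List.perm_append_comm
      refine h1.trans ?_
      have h2 := perm_insSorted (insSorted rest (a + b)) (a + b)
      have h3 : List.Perm ((a + b) :: insSorted rest (a + b)) ((a + b) :: (a + b) :: rest) :=
        (perm_insSorted rest (a + b)).cons _
      exact (h2.trans h3).symm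
    have hsstep : (insSorted (insSorted rest (a + b)) (a + b)).Pairwise (· ≤ ·) :=
      sorted_insSorted _ (sorted_insSorted _ (List.Pairwise.sublist (by simp) hs1))
    have hlstep : 2 ≤ (insSorted (insSorted rest (a + b)) (a + b)).length := by
      have l1 := (perm_insSorted (insSorted rest (a + b)) (a + b)).length_eq
      have l2 := (perm_insSorted rest (a + b)).length_eq
      simp at l1 l2; omega
    have := ih _ _ hpstep hsstep hlstep
    simpa [hmin1, hmin2] using this

-- ===== VERDICT (by name: the statement is the Claim_ definition above) =====
theorem solution_spec : Claim_equal_solution := by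
  intro ability number _ hpre
  unfold Spec_solution solution solution_alt
  rcases hpre with hle | hlen
  · rw [PySem.List.pyRange_one_eq_nil hle]
    simp only [List.foldl_nil]
    exact ((PySem.List.sorted_perm ability (fun x => x) false).sum_eq).symm
  · have hperm : List.Perm ability (PySem.List.sorted ability (fun x => x) false) :=
      (PySem.List.sorted_perm ability (fun x => x) false).symm
    have hsorted : (PySem.List.sorted ability (fun x => x) false).Pairwise (· ≤ ·) := by
      have := PySem.List.sorted_pairwise (xs := ability) (key := fun x => x)
      simpa using this
    have hlen2 : 2 ≤ (PySem.List.sorted ability (fun x => x) false).length := by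
      rw [hperm.symm.length_eq]; exact hlen
    exact (fold_lemma _ _ _ hperm hsorted hlen2).sum_eq
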